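-- pv_equiv track=rewrite | github.com/Davisanity-TW/stock_report | bin/ccstock_generate_report.py | _normalize_md_tables
-- ===== SOURCE A (Python) =====
-- def _normalize_md_tables(md: str) -> str:
--     """Fix common table formatting issues that break VitePress rendering.
--
--     Currently normalizes accidental double pipes ("||") in table rows.
--     Only touches lines that look like markdown table lines.
--     """
--
--     fixed: list[str] = []
--     for ln in md.splitlines(True):
--         if ln.lstrip().startswith("|") and "||" in ln:
--             while "||" in ln:
--                 ln = ln.replace("||", "|")
--         fixed.append(ln)
--     return "".join(fixed)
-- ===== SOURCE B (Python) =====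
-- def _normalize_md_tables(md: str) -> str:
--     """Fix common table formatting issues that break VitePress rendering.
--
--     Single left-to-right pass per table line: collapse each run of
--     consecutive pipes to one pipe, instead of rescanning the whole line
--     with repeated str.replace until no "||" is left.
--     """
--
--     fixed: list[str] = []
--     for ln in md.splitlines(True):
--         if ln.lstrip().startswith("|") and "||" in ln:
--             out: list[str] = []
--             prev_pipe = False
--             for c in ln:
--                 if c == "|":
--                     if not prev_pipe:
--                         out.append(c)
--                     prev_pipe = True
--                 else:
--                     out.append(c)
--                     prev_pipe = False
--             ln = "".join(out)
--         fixed.append(ln)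
--     return "".join(fixed)
-- ===== Notes on version B (the rewrite author's own statement) =====
-- stated objective: alternative
-- what changed: The inner while-loop that repeatedly rescans the whole line with str.replace until no double pipe remains is replaced by a single left-to-right pass that collapses each run of consecutive pipes to one pipe.
import Mathlib
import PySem

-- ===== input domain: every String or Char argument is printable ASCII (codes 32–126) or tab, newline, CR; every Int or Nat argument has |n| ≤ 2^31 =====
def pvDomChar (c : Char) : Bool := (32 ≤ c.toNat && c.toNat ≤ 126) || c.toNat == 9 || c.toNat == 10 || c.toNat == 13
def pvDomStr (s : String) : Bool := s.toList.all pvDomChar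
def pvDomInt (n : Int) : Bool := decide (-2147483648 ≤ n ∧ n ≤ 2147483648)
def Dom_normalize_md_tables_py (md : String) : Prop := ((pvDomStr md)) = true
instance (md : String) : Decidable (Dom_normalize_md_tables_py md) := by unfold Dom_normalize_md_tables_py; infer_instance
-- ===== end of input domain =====

-- B replaces A's repeated whole-line str.replace rescans by a single
-- left-to-right pass that collapses each run of pipes to one pipe (alternative algorithm).

-- ===== PORT A =====

-- hand port of md.splitlines(True) (keepends): exact on the domain, where the only
-- line-break characters that can occur are '\n', '\r' and '\r\n'
def pvSplitKeep : List Char → List Char → List (List Char)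
  | acc, [] => if acc.isEmpty then [] else [acc.reverse]
  | acc, '\r' :: '\n' :: rest => (acc.reverse ++ ['\r', '\n']) :: pvSplitKeep [] rest
  | acc, '\r' :: rest => (acc.reverse ++ ['\r']) :: pvSplitKeep [] rest
  | acc, '\n' :: rest => (acc.reverse ++ ['\n']) :: pvSplitKeep [] rest
  | acc, c :: rest => pvSplitKeep (c :: acc) rest

-- termination helpers for A's while-loop: ln.replace("||","|") written as a
-- two-case scan, and the adjacent-double-pipe test
def pvRep : List Char → List Char
  | [] => []
  | [c] => [c]
  | a :: b :: rest =>
    if a = '|' ∧ b = '|' then '|' :: pvRep rest else a :: pvRep (b :: rest)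

def pvHasDP : List Char → Bool
  | [] => false
  | [_] => false
  | a :: b :: rest => (decide (a = '|') && decide (b = '|')) || pvHasDP (b :: rest)

theorem pvRep_go (fuel : Nat) : ∀ (l acc : List Char), l.length ≤ fuel →
    PySem.Chars.replace.go ['|', '|'] ['|'] fuel l acc = acc.reverse ++ pvRep l := by
  induction fuel with
  | zero =>
    intro l acc h
    have : l = [] := by cases l <;> simp_all
    subst this
    rw [PySem.Chars.replace.go.eq_1]
    simp [pvRep]
  | succ n ih =>
    intro l acc h
    match l with
    | [] =>
      rw [PySem.Chars.replace.go.eq_2 _ _ _ _ (by omega)]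
      simp [pvRep]
    | [c] =>
      rw [PySem.Chars.replace.go.eq_3]
      have hp : (['|', '|'] : List Char).isPrefixOf [c] = false := by
        simp [List.isPrefixOf]
      rw [hp]
      simp only [Bool.false_eq_true, if_false]
      rw [ih [] (c :: acc) (by simp)]
      simp [pvRep]
    | a :: b :: t =>
      rw [PySem.Chars.replace.go.eq_3]
      simp only [List.length_cons] at h
      by_cases hab : a = '|' ∧ b = '|'
      · obtain ⟨rfl, rfl⟩ := hab
        have hp : (['|', '|'] : List Char).isPrefixOf ('|' :: '|' :: t) = true := by
          simp [List.isPrefixOf]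
        rw [hp]
        simp only [if_true]
        have hd : List.drop (['|', '|'] : List Char).length ('|' :: '|' :: t) = t := rfl
        have hr : (['|'] : List Char).reverse ++ acc = '|' :: acc := rfl
        rw [hd, hr, ih t ('|' :: acc) (by omega)]
        rw [pvRep]
        simp
      · have hp : (['|', '|'] : List Char).isPrefixOf (a :: b :: t) = false := by
          simp [List.isPrefixOf]
          intro h1 h2
          exact hab ⟨h1.symm, h2.symm⟩
        rw [hp]
        simp only [Bool.false_eq_true, if_false]
        rw [ih (b :: t) (a :: acc) (by simp; omega)]
        rw [pvRep]
        simp [hab]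

theorem pvReplace_eq (l : List Char) :
    PySem.Chars.replace l ['|', '|'] ['|'] = pvRep l := by
  rw [PySem.Chars.replace]
  simp
  exact pvRep_go l.length l [] (le_refl _)

theorem pvRep_len_le (l : List Char) : (pvRep l).length ≤ l.length := by
  induction l using pvRep.induct with
  | case1 => simp [pvRep]
  | case2 c => simp [pvRep]
  | case3 a b rest hab ih =>
    rw [pvRep, if_pos hab]
    simp only [List.length_cons]
    omega
  | case4 a b rest hab ih =>
    rw [pvRep, if_neg hab]
    simp only [List.length_cons] at ih ⊢
    omega

theorem pvRep_len {l : List Char} (h : pvHasDP l = true) :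
    (pvRep l).length < l.length := by
  induction l using pvRep.induct with
  | case1 => simp [pvHasDP] at h
  | case2 c => simp [pvHasDP] at h
  | case3 a b rest hab ih =>
    rw [pvRep, if_pos hab]
    have := pvRep_len_le rest
    simp only [List.length_cons]
    omega
  | case4 a b rest hab ih =>
    rw [pvRep, if_neg hab]
    rw [pvHasDP] at h
    simp only [Bool.or_eq_true, Bool.and_eq_true, decide_eq_true_eq] at h
    rcases h with ⟨h1, h2⟩ | h
    · exact absurd ⟨h1, h2⟩ hab
    · have := ih h
      simp only [List.length_cons] at this ⊢
      omega

theorem pvHasDP_iff (l : List Char) : pvHasDP l = true ↔ (['|', '|'] : List Char) <:+: l := by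
  induction l using pvHasDP.induct with
  | case1 =>
    simp only [pvHasDP, Bool.false_eq_true, false_iff]
    intro hs
    obtain ⟨s, t, h⟩ := hs
    simpa using congrArg List.length h
  | case2 c =>
    simp only [pvHasDP, Bool.false_eq_true, false_iff]
    intro hs
    obtain ⟨s, t, h⟩ := hs
    have := congrArg List.length h
    simp at this
    omega
  | case3 a b rest ih =>
    rw [pvHasDP]
    simp only [Bool.or_eq_true, Bool.and_eq_true, decide_eq_true_eq]
    rw [ih]
    constructor
    · rintro (⟨rfl, rfl⟩ | h)
      · exact ⟨[], rest, rfl⟩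
      · exact List.infix_cons h
    · intro h
      rcases List.infix_cons_iff.mp h with h | h
      · left
        rcases List.cons_prefix_cons.mp h with ⟨h1, h2⟩
        rcases List.cons_prefix_cons.mp h2 with ⟨h3, _⟩
        exact ⟨h1.symm, h3.symm⟩
      · right; exact h

theorem pvIsIn_eq (l : List Char) : PySem.Chars.isIn ['|', '|'] l = pvHasDP l := by
  by_cases h : pvHasDP l = true
  · rw [h, (PySem.Chars.isIn_iff_infix _ _).mpr ((pvHasDP_iff l).mp h)]
  · simp only [Bool.not_eq_true] at h
    rw [h]
    rcases hi : PySem.Chars.isIn ['|', '|'] l with _ | _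
    · rfl
    · exact absurd ((pvHasDP_iff l).mpr ((PySem.Chars.isIn_iff_infix _ _).mp hi)) (by simp [h])

theorem pvReplace_lt {l : List Char} (h : PySem.Chars.isIn ['|', '|'] l = true) :
    (PySem.Chars.replace l ['|', '|'] ['|']).length < l.length := by
  rw [pvReplace_eq]
  exact pvRep_len (by rw [← pvIsIn_eq]; exact h)

-- while "||" in ln: ln = ln.replace("||", "|")
def pvLoopA (l : List Char) : List Char :=
  if PySem.Chars.isIn ['|', '|'] l = true then
    pvLoopA (PySem.Chars.replace l ['|', '|'] ['|'])
  else l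
termination_by l.length
decreasing_by exact pvReplace_lt ‹_›

def normalize_md_tables_py (md : String) : String :=
  let fixed : List (List Char) :=
    (pvSplitKeep [] md.toList).foldl
      (fun fixed ln =>
        fixed ++ [if PySem.Chars.startswith (PySem.Chars.lstrip ln) ['|']
                     && PySem.Chars.isIn ['|', '|'] ln then pvLoopA ln else ln])
      []
  String.ofList (PySem.Chars.join [] fixed)

-- ===== PORT B =====

-- the single left-to-right pass of Source B: prev tracks whether the previous
-- character was a pipe; a pipe after a pipe is dropped
def pvCollapse : Bool → List Char → List Char
  | _, [] => []
  | prev, c :: rest =>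
    if c = '|' then
      (if prev then pvCollapse true rest else c :: pvCollapse true rest)
    else c :: pvCollapse false rest

def normalize_md_tables_py_alt (md : String) : String :=
  let fixed : List (List Char) :=
    (pvSplitKeep [] md.toList).foldl
      (fun fixed ln =>
        fixed ++ [if PySem.Chars.startswith (PySem.Chars.lstrip ln) ['|']
                     && PySem.Chars.isIn ['|', '|'] ln then pvCollapse false ln else ln])
      []
  String.ofList (PySem.Chars.join [] fixed)

-- ===== PRECONDITION & SPEC =====
def Spec_normalize_md_tables_py (md : String) (out : String) : Prop := out = normalize_md_tables_py_alt md
instance (md : String) (out : String) : Decidable (Spec_normalize_md_tables_py md out) := by unfold Spec_normalize_md_tables_py; infer_instance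

-- ===== CLAIM (what is proved, stated in full; the proofs are below) =====
def Claim_equal_normalize_md_tables_py : Prop := ∀ (md : String), Dom_normalize_md_tables_py md → Spec_normalize_md_tables_py md (normalize_md_tables_py md)

-- ===== LEMMAS AND PROOFS =====

-- the collapse pass is invariant under one replace("||","|") sweep
theorem pvCollapse_pvRep (l : List Char) :
    ∀ prev, pvCollapse prev (pvRep l) = pvCollapse prev l := by
  induction l using pvRep.induct with
  | case1 => intro prev; rfl
  | case2 c => intro prev; rfl
  | case3 a b rest hab ih =>
    intro prev
    rw [pvRep, if_pos hab]
    obtain ⟨rfl, rfl⟩ := hab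
    cases prev <;> simp [pvCollapse, ih]
  | case4 a b rest hab ih =>
    intro prev
    rw [pvRep, if_neg hab]
    by_cases ha : a = '|' <;> cases prev <;> simp [pvCollapse, ha, ih]

-- a line without "||" is a fixed point of the collapse pass
theorem pvCollapse_id : ∀ (l : List Char), pvHasDP l = false →
    ∀ prev, (prev = true → l.head? ≠ some '|') → pvCollapse prev l = l := by
  intro l
  induction l using pvHasDP.induct with
  | case1 => intro _ prev _; rfl
  | case2 c =>
    intro _ prev hprev
    by_cases hc : c = '|'
    · subst hc
      have hp : prev = false := by
        cases prev
        · rfl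
        · exact absurd (hprev rfl) (by simp)
      subst hp
      rw [pvCollapse]
      simp [pvCollapse]
    · cases prev <;> (rw [pvCollapse]; simp [hc, pvCollapse])
  | case3 a b rest ih =>
    intro h prev hprev
    rw [pvHasDP] at h
    simp only [Bool.or_eq_false_iff, Bool.and_eq_false_iff] at h
    obtain ⟨hab, hrest⟩ := h
    by_cases ha : a = '|'
    · subst ha
      have hp : prev = false := by
        cases prev
        · rfl
        · exact absurd (hprev rfl) (by simp)
      subst hp
      have hb : ¬ b = '|' := by
        rcases hab with hab | hab
        · simp at hab
        · simpa using hab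
      have h2 := ih hrest true (by intro _ hh; simp at hh; exact hb hh)
      rw [pvCollapse]
      simp [h2]
    · have h2 := ih hrest false (by simp)
      rw [pvCollapse]
      simp [ha, h2]

-- A's while-loop computes exactly B's single pass
theorem pvLoopA_eq (l : List Char) : pvLoopA l = pvCollapse false l := by
  induction l using pvLoopA.induct with
  | case1 l h ih =>
    rw [pvLoopA, if_pos h, ih, pvReplace_eq, pvCollapse_pvRep]
  | case2 l h =>
    rw [pvLoopA, if_neg h]
    have hdp : pvHasDP l = false := by
      rw [← pvIsIn_eq]; simpa using h
    exact (pvCollapse_id l hdp false (by simp)).symm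

-- ===== VERDICT (by name: the statement is the Claim_ definition above) =====
theorem normalize_md_tables_py_spec : Claim_equal_normalize_md_tables_py := by
  intro md _
  unfold Spec_normalize_md_tables_py normalize_md_tables_py normalize_md_tables_py_alt
  simp only [pvLoopA_eq]
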